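-- pv_equiv track=rewrite | github.com/pranav-ust/cognates | src/graph.py | graph_model
-- ===== SOURCE A (Python) =====
-- from math import ceil, floor
--
-- def graph_model(first, second):
--     ''' Constructs the graphical structure between two shingle sets. '''
--
--     # Step 1: Initialization
--     # If the given sets first and second are empty, we initialize
--     # them by inserting an empty token, (nun), into those sets.
--
--     if len(first) == 0:
--         first.append("nun") #insert empty token if found empty
--     if len(second) == 0:
--         second.append("nun") #insert empty token if found empty
--
--     # Step 2: Equalization of the set cardinalities
--     # The cardinalities of the sets first and second made
--     # equal by inserting empty tokens (nun) into the
--     # middle of the sets.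
--
--     # While loops to equalize the sizes
--     while(len(first) < len(second)):
--         pos = ceil(len(first) / 2)
--         first.insert(pos, "nun")
--
--     # While loops to equalize the sizes
--     while(len(first) > len(second)):
--         pos = floor(len(second) / 2)
--         second.insert(pos, "nun")
--
--     # Step 3: Inserting the mappings of the set members into the graph
--     # The empty graph is initialized as graph = {}.
--     # The directed edges are generated, originating from every set member
--     # of first to every set member of second. This results in a complete
--     # directed bipartite graph between first and second sets.
--
--     # Pairs in tuples
--     graph = set() #Graph in sets to avoid duplicates
--
--     for i in range(len(first)):
--         pair = (first[i], second[i]) # One to one mapping with same index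
--         graph.add(pair)
--     for i in range(len(first) - 1):
--         pair = (first[i], second[i + 1]) # One to one mapping with an index ahead
--         graph.add(pair)
--     if len(first) > 1:
--         for i in range(1, len(first)):
--             pair = (first[i], second[i - 1]) # One to one mapping with an index before
--             graph.add(pair)
--     return graph
-- ===== SOURCE B (Python) =====
-- from math import ceil, floor
--
-- def graph_model(first, second):
--     ''' Constructs the graphical structure between two shingle sets. '''
--     # Initialization: empty sets get the empty token.
--     if not first:
--         first.append("nun")
--     if not second:
--         second.append("nun")
--     # Equalization in ONE splice: all needed "nun" fillers go into the middle
--     # at once (they would pile up contiguously there anyway).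
--     if len(first) < len(second):
--         k = len(second) - len(first)
--         pos = ceil(len(first) / 2)
--         first[pos:pos] = ["nun"] * k
--     elif len(first) > len(second):
--         k = len(first) - len(second)
--         pos = floor(len(second) / 2)
--         second[pos:pos] = ["nun"] * k
--     # Edges: same-index, one ahead, one before -- as three zips, no indexing.
--     graph = set(zip(first, second))
--     graph.update(zip(first, second[1:]))
--     graph.update(zip(first[1:], second))
--     return graph
-- ===== Notes on version B (the rewrite author's own statement) =====
-- stated objective: alternative
-- what changed: Replaces the one-at-a-time middle insertions with a single splice of all fillers at the fixed middle position, and builds the three edge families with zips/set-updates instead of index loops.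
import Mathlib
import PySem

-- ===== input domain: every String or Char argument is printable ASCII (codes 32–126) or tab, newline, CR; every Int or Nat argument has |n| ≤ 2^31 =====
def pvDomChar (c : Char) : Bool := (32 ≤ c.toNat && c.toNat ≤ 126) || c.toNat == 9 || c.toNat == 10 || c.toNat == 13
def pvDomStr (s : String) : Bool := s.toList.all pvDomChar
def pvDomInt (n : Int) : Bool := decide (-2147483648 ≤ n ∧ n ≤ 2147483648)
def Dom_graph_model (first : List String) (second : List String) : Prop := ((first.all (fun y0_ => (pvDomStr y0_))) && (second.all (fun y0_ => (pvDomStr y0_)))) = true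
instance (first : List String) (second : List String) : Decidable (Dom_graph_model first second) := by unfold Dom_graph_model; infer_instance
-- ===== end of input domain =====

-- B equalizes the two lists with ONE middle splice instead of A's repeated middle
-- inserts and builds the edges with zips/set-updates instead of index loops.
-- A mutates its arguments in place (B performs the same mutation, reaching the
-- same final lists); the equivalence proved here is about the RETURN value.

-- ===== PORT A =====
-- while len(first) < len(second): first.insert(ceil(len(first)/2), "nun")
-- math.ceil(len(first)/2) is exactly (len(first)+1)//2 for list lengths (float division by 2 is exact there).
def pvGrowFirst (first second : List String) : List String :=
  if first.length < second.length then
    pvGrowFirst (PySem.List.insert first (((first.length + 1) / 2 : Nat) : Int) "nun") second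
  else first
termination_by second.length - first.length
decreasing_by simp [PySem.List.length_insert]; omega

-- while len(first) > len(second): second.insert(floor(len(second)/2), "nun")
def pvGrowSecond (first second : List String) : List String :=
  if second.length < first.length then
    pvGrowSecond first (PySem.List.insert second ((second.length / 2 : Nat) : Int) "nun")
  else second
termination_by first.length - second.length
decreasing_by simp [PySem.List.length_insert]; omega

-- Step 3 of A: the two-and-a-half index loops filling the set.
def pvEdgesA (first : List String) (second : List String) : List (String × String) :=
  let g : PySem.Set (String × String) := PySem.Set.empty
  let g := (PySem.List.pyRange 0 (first.length : Int) 1).foldl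
      (fun g i => PySem.Set.add g (PySem.List.pyGetD first i "", PySem.List.pyGetD second i "")) g
  let g := (PySem.List.pyRange 0 ((first.length : Int) - 1) 1).foldl
      (fun g i => PySem.Set.add g (PySem.List.pyGetD first i "", PySem.List.pyGetD second (i + 1) "")) g
  if 1 < first.length then
    (PySem.List.pyRange 1 (first.length : Int) 1).foldl
      (fun g i => PySem.Set.add g (PySem.List.pyGetD first i "", PySem.List.pyGetD second (i - 1) "")) g
  else g

def graph_model (first : List String) (second : List String) : List (String × String) :=
  let first := if first.length = 0 then first ++ ["nun"] else first
  let second := if second.length = 0 then second ++ ["nun"] else second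
  let first := pvGrowFirst first second
  let second := pvGrowSecond first second
  pvEdgesA first second

-- ===== PORT B =====
-- first[pos:pos] = ["nun"] * k  is exactly  take pos ++ replicate k ++ drop pos  (0 ≤ pos ≤ len here);
-- second[1:] is exactly drop 1; set(zip(..)) is PySem.Set.ofList, set.update is PySem.Set.update; ceil/floor of len/2 as in port A.
def graph_model_alt (first : List String) (second : List String) : List (String × String) :=
  let first := if first = [] then first ++ ["nun"] else first
  let second := if second = [] then second ++ ["nun"] else second
  let p :=
    if first.length < second.length then
      let k := second.length - first.length
      let pos := (first.length + 1) / 2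
      (first.take pos ++ List.replicate k "nun" ++ first.drop pos, second)
    else if second.length < first.length then
      let k := first.length - second.length
      let pos := second.length / 2
      (first, second.take pos ++ List.replicate k "nun" ++ second.drop pos)
    else (first, second)
  let graph := PySem.Set.ofList (p.1.zip p.2)
  let graph := PySem.Set.update graph (p.1.zip (p.2.drop 1))
  let graph := PySem.Set.update graph ((p.1.drop 1).zip p.2)
  graph

-- ===== PRECONDITION & SPEC =====
def Spec_graph_model (first : List String) (second : List String) (out : List (String × String)) : Prop := out = graph_model_alt first second
instance (first : List String) (second : List String) (out : List (String × String)) : Decidable (Spec_graph_model first second out) := by unfold Spec_graph_model; infer_instance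

-- ===== CLAIM (what is proved, stated in full; the proofs are below) =====
def Claim_equal_graph_model : Prop := ∀ (first : List String) (second : List String), Dom_graph_model first second → Spec_graph_model first second (graph_model first second)

-- ===== LEMMAS AND PROOFS =====

-- Inserting "nun" anywhere inside (or adjacent to) a contiguous block of "nun"s keeps it one block.
lemma pv_insert_block (a b : List String) (j t : Nat) (ht : t ≤ j) :
    PySem.List.insert (a ++ List.replicate j "nun" ++ b) ((a.length + t : Nat) : Int) "nun"
      = a ++ List.replicate (j + 1) "nun" ++ b := by
  rw [PySem.List.insert_natCast _ _ _ (by simp; omega)]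
  rw [List.append_assoc, List.take_append, List.drop_append]
  rw [List.take_append_of_le_length (by simpa using ht),
      List.drop_append_of_le_length (by simpa using ht)]
  simp [List.take_replicate, List.drop_replicate, Nat.min_eq_left ht]
  rw [List.take_of_length_le (by omega), List.drop_eq_nil_of_le (by omega)]
  simp only [List.nil_append, ← List.cons_append, ← List.replicate_succ, ← List.append_assoc,
    ← List.replicate_add]
  rw [show t + (j - t + 1) = j + 1 from by omega]

-- Repeated middle insertion into first = one splice (invariant form).
lemma pvGrowFirst_aux (d : Nat) (a b s : List String) (j : Nat)
    (hlen : s.length = a.length + j + b.length + d)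
    (hinv : b.length ≤ a.length ∧ a.length ≤ b.length + 1) :
    pvGrowFirst (a ++ List.replicate j "nun" ++ b) s = a ++ List.replicate (j + d) "nun" ++ b := by
  induction d generalizing j with
  | zero =>
      rw [pvGrowFirst, if_neg (by simp only [List.length_append, List.length_replicate]; omega)]
      simp
  | succ d ih =>
      have hl : (a ++ List.replicate j "nun" ++ b).length = a.length + j + b.length := by
        simp only [List.length_append, List.length_replicate]
      rw [pvGrowFirst, if_pos (by simp only [List.length_append, List.length_replicate]; omega),
        hl]
      rw [show (a.length + j + b.length + 1) / 2
            = a.length + ((a.length + j + b.length + 1) / 2 - a.length) by omega]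
      rw [pv_insert_block a b j _ (by omega)]
      rw [ih (j + 1) (by omega), show j + 1 + d = j + (d + 1) from by omega]

lemma pvGrowFirst_eq (f s : List String) (h : f.length ≤ s.length) :
    pvGrowFirst f s
      = f.take ((f.length + 1) / 2) ++ List.replicate (s.length - f.length) "nun"
          ++ f.drop ((f.length + 1) / 2) := by
  have hp : (f.length + 1) / 2 ≤ f.length := by omega
  have h1 : (f.take ((f.length + 1) / 2)).length = (f.length + 1) / 2 := by
    simp [Nat.min_eq_left hp]
  have h2 : (f.drop ((f.length + 1) / 2)).length = f.length - (f.length + 1) / 2 := by simp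
  have := pvGrowFirst_aux (s.length - f.length)
      (f.take ((f.length + 1) / 2)) (f.drop ((f.length + 1) / 2)) s 0
      (by rw [h1, h2]; omega) (by rw [h1, h2]; omega)
  simpa using this

lemma pvGrowFirst_skip (f s : List String) (h : s.length ≤ f.length) : pvGrowFirst f s = f := by
  rw [pvGrowFirst]; simp [Nat.not_lt.mpr h]

lemma pvGrowSecond_aux (d : Nat) (f a b : List String) (j : Nat)
    (hlen : f.length = a.length + j + b.length + d)
    (hinv : a.length ≤ b.length ∧ b.length ≤ a.length + 1) :
    pvGrowSecond f (a ++ List.replicate j "nun" ++ b) = a ++ List.replicate (j + d) "nun" ++ b := by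
  induction d generalizing j with
  | zero =>
      rw [pvGrowSecond, if_neg (by simp only [List.length_append, List.length_replicate]; omega)]
      simp
  | succ d ih =>
      have hl : (a ++ List.replicate j "nun" ++ b).length = a.length + j + b.length := by
        simp only [List.length_append, List.length_replicate]
      rw [pvGrowSecond, if_pos (by simp only [List.length_append, List.length_replicate]; omega),
        hl]
      rw [show (a.length + j + b.length) / 2
            = a.length + ((a.length + j + b.length) / 2 - a.length) by omega]
      rw [pv_insert_block a b j _ (by omega)]
      rw [ih (j + 1) (by omega), show j + 1 + d = j + (d + 1) from by omega]

lemma pvGrowSecond_eq (f s : List String) (h : s.length ≤ f.length) :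
    pvGrowSecond f s
      = s.take (s.length / 2) ++ List.replicate (f.length - s.length) "nun"
          ++ s.drop (s.length / 2) := by
  have hp : s.length / 2 ≤ s.length := by omega
  have h1 : (s.take (s.length / 2)).length = s.length / 2 := by simp [Nat.min_eq_left hp]
  have h2 : (s.drop (s.length / 2)).length = s.length - s.length / 2 := by simp
  have := pvGrowSecond_aux (f.length - s.length) f
      (s.take (s.length / 2)) (s.drop (s.length / 2)) 0
      (by rw [h1, h2]; omega) (by rw [h1, h2]; omega)
  simpa using this

lemma pvGrowSecond_skip (f s : List String) (h : f.length ≤ s.length) : pvGrowSecond f s = s := by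
  rw [pvGrowSecond]; simp [Nat.not_lt.mpr h]

-- (range (min |F| |S|)).map (k => (F[k], S[k])) = F.zip S
lemma pv_zip_eq_map_range (F S : List String) :
    (List.range (min F.length S.length)).map (fun k => (F.getD k "", S.getD k "")) = F.zip S := by
  induction F generalizing S with
  | nil => simp
  | cons f F ih =>
      cases S with
      | nil => simp
      | cons s S =>
          simp only [List.length_cons, Nat.succ_min_succ, List.range_succ_eq_map, List.map_cons,
            List.map_map, List.getD_cons_zero, List.zip_cons_cons]
          rw [← ih S]
          rfl

lemma pv_getD_drop_one (l : List String) (k : Nat) : (l.drop 1).getD k "" = l.getD (k + 1) "" := by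
  simp [List.getD_eq_getElem?_getD]

-- the three index loops of A, as mapped lists
lemma pv_map1 (F S : List String) (hn : F.length = S.length) :
    (PySem.List.pyRange 0 (F.length : Int) 1).map
      (fun i => (PySem.List.pyGetD F i "", PySem.List.pyGetD S i "")) = F.zip S := by
  rw [PySem.List.pyRange_zero_nat, List.map_map]
  have := pv_zip_eq_map_range F S
  rw [← hn, Nat.min_self] at this
  rw [← this]
  apply List.map_congr_left
  intro k _
  simp [PySem.List.pyGetD_natCast]

lemma pv_map2 (F S : List String) (hn : F.length = S.length) (h1 : 1 ≤ F.length) :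
    (PySem.List.pyRange 0 ((F.length : Int) - 1) 1).map
      (fun i => (PySem.List.pyGetD F i "", PySem.List.pyGetD S (i + 1) "")) = F.zip (S.drop 1) := by
  rw [show ((F.length : Int) - 1) = ((F.length - 1 : Nat) : Int) by push_cast [h1]; ring]
  rw [PySem.List.pyRange_zero_nat, List.map_map]
  have := pv_zip_eq_map_range F (S.drop 1)
  rw [show min F.length (S.drop 1).length = F.length - 1 by simp; omega] at this
  rw [← this]
  apply List.map_congr_left
  intro k _
  dsimp only [Function.comp]
  have hc : ((k : Int) + 1) = ((k + 1 : Nat) : Int) := by push_cast; ring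
  rw [hc, PySem.List.pyGetD_natCast, PySem.List.pyGetD_natCast, pv_getD_drop_one]

lemma pv_map3 (F S : List String) (hn : F.length = S.length) (h1 : 1 ≤ F.length) :
    (PySem.List.pyRange 1 (F.length : Int) 1).map
      (fun i => (PySem.List.pyGetD F i "", PySem.List.pyGetD S (i - 1) "")) = (F.drop 1).zip S := by
  rw [PySem.List.pyRange_one, List.map_map]
  rw [show ((F.length : Int) - 1).toNat = F.length - 1 by omega]
  have := pv_zip_eq_map_range (F.drop 1) S
  rw [show min (F.drop 1).length S.length = F.length - 1 by simp; omega] at this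
  rw [← this]
  apply List.map_congr_left
  intro k _
  dsimp only [Function.comp]
  have e1 : ((1 : Int) + (k : Int)) = ((k + 1 : Nat) : Int) := by push_cast; ring
  have e2 : (((k + 1 : Nat) : Int) - 1) = ((k : Nat) : Int) := by push_cast; ring
  rw [e1, e2, PySem.List.pyGetD_natCast, PySem.List.pyGetD_natCast, pv_getD_drop_one]

-- a loop 'for i in R: g.add(f(i))' is a fold of Set.add over the mapped list
lemma pv_foldl_add_map (l : List Int) (f : Int → String × String)
    (init : PySem.Set (String × String)) :
    l.foldl (fun g i => PySem.Set.add g (f i)) init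
      = List.foldl PySem.Set.add init (l.map f) := by
  rw [List.foldl_map]

-- A's three index loops produce exactly B's three zips (lengths equal, n ≥ 1).
lemma pv_edges_eq (F S : List String) (hn : F.length = S.length) (h1 : 1 ≤ F.length) :
    pvEdgesA F S = PySem.Set.update (PySem.Set.update (PySem.Set.ofList (F.zip S))
      (F.zip (S.drop 1))) ((F.drop 1).zip S) := by
  show (if 1 < F.length then
      (PySem.List.pyRange 1 (F.length : Int) 1).foldl
        (fun g i => PySem.Set.add g (PySem.List.pyGetD F i "", PySem.List.pyGetD S (i - 1) ""))
        ((PySem.List.pyRange 0 ((F.length : Int) - 1) 1).foldl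
          (fun g i => PySem.Set.add g (PySem.List.pyGetD F i "", PySem.List.pyGetD S (i + 1) ""))
          ((PySem.List.pyRange 0 (F.length : Int) 1).foldl
            (fun g i => PySem.Set.add g (PySem.List.pyGetD F i "", PySem.List.pyGetD S i ""))
            PySem.Set.empty))
    else
      (PySem.List.pyRange 0 ((F.length : Int) - 1) 1).foldl
        (fun g i => PySem.Set.add g (PySem.List.pyGetD F i "", PySem.List.pyGetD S (i + 1) ""))
        ((PySem.List.pyRange 0 (F.length : Int) 1).foldl
          (fun g i => PySem.Set.add g (PySem.List.pyGetD F i "", PySem.List.pyGetD S i ""))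
          PySem.Set.empty)) = _
  rw [PySem.Set.ofList_eq_foldl]
  by_cases h2 : 1 < F.length
  · rw [if_pos h2, pv_foldl_add_map, pv_map3 F S hn h1, pv_foldl_add_map, pv_map2 F S hn h1,
      pv_foldl_add_map, pv_map1 F S hn]
    rfl
  · rw [if_neg h2, pv_foldl_add_map, pv_map2 F S hn h1, pv_foldl_add_map, pv_map1 F S hn]
    have hd : F.drop 1 = [] := by
      have h3 : F.length = 1 := by omega
      rw [List.drop_one]
      apply List.eq_nil_of_length_eq_zero
      simp [List.length_tail, h3]
    rw [hd]
    rfl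

-- ===== VERDICT (by name: the statement is the Claim_ definition above) =====
theorem graph_model_spec : Claim_equal_graph_model := by
  intro first second _
  show graph_model first second = graph_model_alt first second
  have hf : 1 ≤ (if first = [] then first ++ ["nun"] else first).length := by
    rcases eq_or_ne first [] with h | h
    · simp [h]
    · rw [if_neg h]
      have := List.length_pos_iff.mpr h
      omega
  have hs : 1 ≤ (if second = [] then second ++ ["nun"] else second).length := by
    rcases eq_or_ne second [] with h | h
    · simp [h]
    · rw [if_neg h]
      have := List.length_pos_iff.mpr h
      omega
  simp only [graph_model, graph_model_alt, List.length_eq_zero_iff]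
  set f0 := if first = [] then first ++ ["nun"] else first with hf0
  set s0 := if second = [] then second ++ ["nun"] else second with hs0
  clear hf0 hs0
  rcases lt_trichotomy f0.length s0.length with h | h | h
  · -- first grows
    rw [pvGrowFirst_eq f0 s0 (le_of_lt h), if_pos h]
    set F := f0.take ((f0.length + 1) / 2) ++ List.replicate (s0.length - f0.length) "nun"
        ++ f0.drop ((f0.length + 1) / 2) with hF
    have hFlen : F.length = s0.length := by
      rw [hF]
      simp only [List.length_append, List.length_replicate, List.length_take, List.length_drop]
      omega
    rw [pvGrowSecond_skip F s0 hFlen.le]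
    exact pv_edges_eq F s0 hFlen (by omega)
  · -- already equal
    rw [pvGrowFirst_skip f0 s0 (le_of_eq h.symm), pvGrowSecond_skip f0 s0 (le_of_eq h),
      if_neg (by omega), if_neg (by omega)]
    exact pv_edges_eq f0 s0 h hf
  · -- second grows
    rw [pvGrowFirst_skip f0 s0 (le_of_lt h), pvGrowSecond_eq f0 s0 (le_of_lt h),
      if_neg (by omega), if_pos h]
    set S := s0.take (s0.length / 2) ++ List.replicate (f0.length - s0.length) "nun"
        ++ s0.drop (s0.length / 2) with hS
    have hSlen : f0.length = S.length := by
      rw [hS]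
      simp only [List.length_append, List.length_replicate, List.length_take, List.length_drop]
      omega
    exact pv_edges_eq f0 S hSlen hf
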